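-- pv_equiv track=rewrite | github.com/yuezuegu/sosa-compiler | precompiler/systolic_model.py | map_chunks
-- ===== SOURCE A (Python) =====
-- def map_chunks(no_array, input_chunks, weight_chunks):
--
--     chunks = []
--     for (i,j) in weight_chunks.keys():
--         for (k,l) in input_chunks.keys():
--             if(i==l):
--                 chunks.append([input_chunks[(k,l)], weight_chunks[(i,j)]])
--
--     chunk_map = []
--     for i in range(no_array):
--         chunk_map.append([])
--
--     for c in range(len(chunks)):
--         chunk_map[c%no_array].append(chunks[c])
--
--     return chunk_map
-- ===== SOURCE B (Python) =====
-- def map_chunks(no_array, input_chunks, weight_chunks):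
--     by_l = {}
--     for (k, l), v in input_chunks.items():
--         by_l.setdefault(l, []).append(v)
--     chunks = [[iv, wv] for (i, j), wv in weight_chunks.items() for iv in by_l.get(i, [])]
--     return [chunks[a::no_array] for a in range(no_array)]
-- ===== Notes on version B (the rewrite author's own statement) =====
-- stated objective: alternative
-- what changed: B replaces A's nested scan over all weight/input key pairs by a dict-of-lists index of input values keyed by their second key coordinate, and replaces A's modulo-append distribution loop by strided slices chunks[a::no_array]; Pre_ excludes only the inputs where A raises (no_array <= 0 while some pair matches).
import Mathlib
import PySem

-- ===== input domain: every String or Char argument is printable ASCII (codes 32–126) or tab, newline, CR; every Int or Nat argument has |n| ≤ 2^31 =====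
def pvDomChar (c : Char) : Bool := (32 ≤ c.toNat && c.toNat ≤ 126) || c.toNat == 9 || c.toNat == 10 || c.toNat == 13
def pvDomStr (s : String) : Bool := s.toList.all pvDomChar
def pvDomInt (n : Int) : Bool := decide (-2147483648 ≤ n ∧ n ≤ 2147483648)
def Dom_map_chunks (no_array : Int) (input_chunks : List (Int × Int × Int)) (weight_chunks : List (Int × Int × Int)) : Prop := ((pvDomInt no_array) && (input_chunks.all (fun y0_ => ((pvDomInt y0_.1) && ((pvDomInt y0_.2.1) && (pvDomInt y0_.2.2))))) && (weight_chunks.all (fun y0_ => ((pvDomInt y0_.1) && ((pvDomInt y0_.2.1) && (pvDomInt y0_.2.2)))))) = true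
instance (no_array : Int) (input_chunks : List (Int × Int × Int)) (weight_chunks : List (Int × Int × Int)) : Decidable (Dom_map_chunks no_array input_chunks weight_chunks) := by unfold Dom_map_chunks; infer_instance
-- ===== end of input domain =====

-- B replaces A's nested scan over all weight/input key pairs by a dict-of-lists index keyed by the
-- input key's second coordinate, and replaces A's modulo-append distribution loop by strided slices.

-- Shared input decoding: a List (Int × Int × Int) argument stands for the Python dict {(a, b): c}
-- built from those triples in order (later duplicates overwrite in place, as Python dicts do).
def chunksToDict (xs : List (Int × Int × Int)) : PySem.Dict (Int × Int) Int :=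
  xs.foldl (fun d t => d.insert (t.1, t.2.1) t.2.2) PySem.Dict.empty

-- ===== PORT A =====
def map_chunks (no_array : Int) (input_chunks : List (Int × Int × Int)) (weight_chunks : List (Int × Int × Int)) : List (List (List Int)) :=
  let inD := chunksToDict input_chunks
  let wD := chunksToDict weight_chunks
  let chunks := wD.keys.foldl (fun acc ij =>
      inD.keys.foldl (fun acc2 kl =>
        if ij.1 == kl.2 then acc2 ++ [[inD.getD kl 0, wD.getD ij 0]] else acc2) acc) []
  let chunk_map := (PySem.List.pyRange 0 no_array 1).foldl
      (fun cm _ => cm ++ [([] : List (List Int))]) []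
  (PySem.List.pyRange 0 (chunks.length : Int) 1).foldl (fun cm c =>
      PySem.List.pySetD cm (PySem.Int.mod c no_array)
        (PySem.List.pyGetD cm (PySem.Int.mod c no_array) [] ++ [PySem.List.pyGetD chunks c []]))
    chunk_map

-- ===== PORT B =====
def map_chunks_alt (no_array : Int) (input_chunks : List (Int × Int × Int)) (weight_chunks : List (Int × Int × Int)) : List (List (List Int)) :=
  let inD := chunksToDict input_chunks
  let wD := chunksToDict weight_chunks
  let by_l := inD.items.foldl (fun d p => d.modify p.1.2 [] (· ++ [p.2])) PySem.Dict.empty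
  let chunks := wD.items.flatMap (fun p => (by_l.getD p.1.1 []).map (fun iv => [iv, p.2]))
  (PySem.List.pyRange 0 no_array 1).map
    (fun a => (PySem.List.slice? chunks (some a) none no_array).getD [])

-- ===== PRECONDITION & SPEC =====
-- Pre_ excludes exactly the inputs where A raises: no_array ≤ 0 while some weight key's first
-- coordinate matches some input key's second coordinate (ZeroDivisionError for no_array = 0,
-- IndexError for no_array < 0).
def Pre_map_chunks (no_array : Int) (input_chunks : List (Int × Int × Int)) (weight_chunks : List (Int × Int × Int)) : Prop :=
  0 < no_array ∨ ∀ t ∈ weight_chunks, ∀ s ∈ input_chunks, t.1 ≠ s.2.1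
instance (no_array : Int) (input_chunks : List (Int × Int × Int)) (weight_chunks : List (Int × Int × Int)) : Decidable (Pre_map_chunks no_array input_chunks weight_chunks) := by unfold Pre_map_chunks; infer_instance
def pvWitness_map_chunks : Int × (List (Int × Int × Int)) × (List (Int × Int × Int)) :=
  (2, [(0, 1, 5), (3, 1, 6)], [(1, 3, 7), (2, 0, 8)])

def Spec_map_chunks (no_array : Int) (input_chunks : List (Int × Int × Int)) (weight_chunks : List (Int × Int × Int)) (out : List (List (List Int))) : Prop := out = map_chunks_alt no_array input_chunks weight_chunks
instance (no_array : Int) (input_chunks : List (Int × Int × Int)) (weight_chunks : List (Int × Int × Int)) (out : List (List (List Int))) : Decidable (Spec_map_chunks no_array input_chunks weight_chunks out) := by unfold Spec_map_chunks; infer_instance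

-- ===== CLAIM =====
def Claim_equal_map_chunks : Prop := ∀ (no_array : Int) (input_chunks : List (Int × Int × Int)) (weight_chunks : List (Int × Int × Int)), Dom_map_chunks no_array input_chunks weight_chunks → Pre_map_chunks no_array input_chunks weight_chunks → Spec_map_chunks no_array input_chunks weight_chunks (map_chunks no_array input_chunks weight_chunks)
-- ===== LEMMAS AND PROOFS =====

theorem intBeq_comm (a b : Int) : (a == b) = (b == a) := by
  by_cases h : a = b
  · simp [h]
  · simp [h]; exact fun hh => h hh.symm

theorem mem_keys_chunksToDict {xs : List (Int × Int × Int)} {k : Int × Int}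
    (h : k ∈ (chunksToDict xs).keys) : ∃ t ∈ xs, k = (t.1, t.2.1) := by
  unfold chunksToDict at h
  rw [PySem.Dict.keys_foldl_insert_key xs (fun t => (t.1, t.2.1)) (fun _ t => t.2.2)] at h
  rw [PySem.Dict.keys_empty] at h
  rw [PySem.Set.update_nil_left] at h
  rw [PySem.Set.mem_ofList] at h
  rcases List.mem_map.mp h with ⟨t, ht, rfl⟩
  exact ⟨t, ht, rfl⟩

theorem nodup_keys_chunksToDict (xs : List (Int × Int × Int)) :
    (chunksToDict xs).keys.Nodup :=
  PySem.Dict.nodup_keys_foldl_insert_key xs (fun t => (t.1, t.2.1)) (fun _ t => t.2.2) _ PySem.Dict.nodup_keys_empty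

theorem chunks_eq (ics wcs : List (Int × Int × Int)) :
    (chunksToDict wcs).keys.foldl (fun acc ij =>
        (chunksToDict ics).keys.foldl (fun acc2 kl =>
          if ij.1 == kl.2 then acc2 ++ [[(chunksToDict ics).getD kl 0, (chunksToDict wcs).getD ij 0]] else acc2) acc) []
    = (chunksToDict wcs).items.flatMap (fun p =>
        (((chunksToDict ics).items.foldl (fun d q => d.modify q.1.2 [] (· ++ [q.2])) PySem.Dict.empty).getD p.1.1 []).map
          (fun iv => [iv, p.2])) := by
  have hni := nodup_keys_chunksToDict ics
  have hnw := nodup_keys_chunksToDict wcs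
  -- LHS to flatMap over keys
  have hL : (chunksToDict wcs).keys.foldl (fun acc ij =>
        (chunksToDict ics).keys.foldl (fun acc2 kl =>
          if ij.1 == kl.2 then acc2 ++ [[(chunksToDict ics).getD kl 0, (chunksToDict wcs).getD ij 0]] else acc2) acc) []
      = (chunksToDict wcs).keys.flatMap (fun ij =>
          ((chunksToDict ics).keys.filter (fun kl => ij.1 == kl.2)).map
            (fun kl => [(chunksToDict ics).getD kl 0, (chunksToDict wcs).getD ij 0])) := by
    have h1 : ∀ (acc : List (List Int)) (ij : Int × Int), ij ∈ (chunksToDict wcs).keys →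
        (chunksToDict ics).keys.foldl (fun acc2 kl =>
          if ij.1 == kl.2 then acc2 ++ [[(chunksToDict ics).getD kl 0, (chunksToDict wcs).getD ij 0]] else acc2) acc
        = acc ++ ((chunksToDict ics).keys.filter (fun kl => ij.1 == kl.2)).map
            (fun kl => [(chunksToDict ics).getD kl 0, (chunksToDict wcs).getD ij 0]) := by
      intro acc ij _
      exact PySem.List.foldl_append_if _ _ _ _
    rw [PySem.List.foldl_congr_mem _ _ (fun acc ij =>
        acc ++ ((chunksToDict ics).keys.filter (fun kl => ij.1 == kl.2)).map
          (fun kl => [(chunksToDict ics).getD kl 0, (chunksToDict wcs).getD ij 0])) _ h1]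
    exact PySem.List.foldl_append_eq_flatMap _ _ _
  rw [hL]
  -- RHS: group dict lookup
  have hgrp : ∀ c : Int,
      (((chunksToDict ics).items.foldl (fun d q => d.modify q.1.2 [] (· ++ [q.2])) PySem.Dict.empty).getD c [])
      = ((chunksToDict ics).items.filter (fun q => q.1.2 == c)).map (fun q => q.2) := by
    intro c
    have hfm : (((chunksToDict ics).items.map (fun q => (q.1.2, q.2))).foldl (fun d r => d.modify r.1 [] (· ++ [r.2])) PySem.Dict.empty)
        = ((chunksToDict ics).items.foldl (fun d q => d.modify q.1.2 [] (· ++ [q.2])) PySem.Dict.empty) :=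
      List.foldl_map (f := fun q : (Int × Int) × Int => (q.1.2, q.2))
        (g := fun (d : PySem.Dict Int (List Int)) (r : Int × Int) => d.modify r.1 [] (· ++ [r.2]))
    rw [← hfm]
    rw [PySem.Dict.getD_foldl_modify_append]
    simp [List.filter_map, Function.comp_def]
  simp only [hgrp]
  -- items → keys
  rw [PySem.Dict.items_eq_map_keys _ hnw 0, PySem.Dict.items_eq_map_keys _ hni 0]
  rw [List.flatMap_map]
  congr 1
  funext ij
  rw [List.filter_map]
  simp only [List.map_map, Function.comp_def]
  rw [List.filter_congr (fun kl _ => (intBeq_comm ij.1 kl.2))]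

theorem filter_mod_range (n b : Nat) (hn : 0 < n) (hb : b < n) : ∀ L : Nat,
    (List.range L).filter (fun i => decide (i % n = b))
    = (List.range ((L - b + n - 1) / n)).map (fun k => b + n * k) := by
  intro L
  induction L with
  | zero =>
    have h0 : (0 - b + n - 1) / n = 0 := Nat.div_eq_of_lt (by omega)
    rw [h0]; simp
  | succ L ih =>
    rw [List.range_succ, List.filter_append, ih]
    have hq := Nat.div_add_mod L n
    have hr : L % n < n := Nat.mod_lt _ hn
    have hmul : n * (L / n + 1) = n * (L / n) + n := by ring
    by_cases hLb : L % n = b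
    · have h1 : L - b + n - 1 = n * (L / n) + (n - 1) := by omega
      have h2 : L + 1 - b + n - 1 = n * (L / n) + n := by omega
      have hC1 : (L - b + n - 1) / n = L / n := by
        rw [h1, Nat.mul_add_div hn, Nat.div_eq_of_lt (show n - 1 < n by omega), Nat.add_zero]
      have hC2 : (L + 1 - b + n - 1) / n = L / n + 1 := by
        rw [h2, Nat.mul_add_div hn, Nat.div_self hn]
      rw [hC1, hC2, List.range_succ, List.map_append]
      simp [hLb]
      omega
    · have hC : (L + 1 - b + n - 1) / n = (L - b + n - 1) / n := by
        by_cases hLlt : L < b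
        · have e2 : L - b + n - 1 = n - 1 := by omega
          have e1 : L + 1 - b + n - 1 = n - 1 + (L + 1 - b) := by omega
          have e3 : L + 1 - b = 0 := by omega
          rw [e2, Nat.div_eq_of_lt (show n - 1 < n by omega), e1, e3, Nat.add_zero,
            Nat.div_eq_of_lt (show n - 1 < n by omega)]
        · by_cases hrb : b < L % n
          · have e1 : L - b + n - 1 = n * (L / n + 1) + (L % n - b - 1) := by omega
            have e2 : L + 1 - b + n - 1 = n * (L / n + 1) + (L % n - b) := by omega
            have v1 : (L - b + n - 1) / n = L / n + 1 := by
              rw [e1, Nat.mul_add_div hn, Nat.div_eq_of_lt (show L % n - b - 1 < n by omega), Nat.add_zero]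
            have v2 : (L + 1 - b + n - 1) / n = L / n + 1 := by
              rw [e2, Nat.mul_add_div hn, Nat.div_eq_of_lt (show L % n - b < n by omega), Nat.add_zero]
            rw [v1, v2]
          · have e1 : L - b + n - 1 = n * (L / n) + (n - 1 - b + L % n) := by omega
            have e2 : L + 1 - b + n - 1 = n * (L / n) + (n - b + L % n) := by omega
            have v1 : (L - b + n - 1) / n = L / n := by
              rw [e1, Nat.mul_add_div hn, Nat.div_eq_of_lt (show n - 1 - b + L % n < n by omega), Nat.add_zero]
            have v2 : (L + 1 - b + n - 1) / n = L / n := by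
              rw [e2, Nat.mul_add_div hn, Nat.div_eq_of_lt (show n - b + L % n < n by omega), Nat.add_zero]
            rw [v1, v2]
      rw [hC]
      simp [hLb]

theorem slice?_stride {α : Type} (cs : List α) (n b : Nat) (d : α) (hn : 0 < n) (hb : b < n) :
    PySem.List.slice? cs (some (b : Int)) none (n : Int)
    = some (((List.range cs.length).filter (fun i => decide (i % n = b))).map (fun i => cs.getD i d)) := by
  have hn0 : ¬ ((n : Int) = 0) := by exact_mod_cast hn.ne'
  have hnneg : ¬ ((n : Int) < 0) := by omega
  have hbneg : ¬ ((b : Int) < 0) := by omega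
  simp only [PySem.List.slice?, PySem.List.sliceIndices, if_neg hn0, if_neg hnneg, if_neg hbneg]
  rw [if_pos (show (0:Int) < (n:Int) by exact_mod_cast hn)]
  by_cases hbl : b < cs.length
  · have hmin : min (b : Int) (cs.length : Int) = (b : Int) := by omega
    rw [hmin, if_pos (show (b:Int) < (cs.length:Int) by exact_mod_cast hbl)]
    have hcast : ((cs.length : Int) - (b : Int) + (n : Int) - 1) = ((cs.length - b + n - 1 : Nat) : Int) := by
      omega
    have hdiv : (((cs.length - b + n - 1 : Nat) : Int) / (n : Int)).toNat = (cs.length - b + n - 1) / n := by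
      rw [show ((cs.length - b + n - 1 : Nat) : Int) / (n : Int) = (((cs.length - b + n - 1) / n : Nat) : Int) by exact_mod_cast rfl]
      exact Int.toNat_natCast _
    rw [hcast, hdiv]
    set cnt := (cs.length - b + n - 1) / n with hcnt
    have hlt : ∀ k, k < cnt → b + n * k < cs.length := by
      intro k hk
      have h1 : n * (k + 1) ≤ n * cnt := Nat.mul_le_mul_left _ (by omega)
      have h2 : cnt * n ≤ cs.length - b + n - 1 := Nat.div_mul_le_self _ _
      have h3 : n * (k + 1) = n * k + n := by ring
      have h4 : n * cnt = cnt * n := by ring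
      omega
    have hfm : ∀ k ∈ List.range cnt,
        cs[((b : Int) + (n : Int) * (k : Int)).toNat]? = some (cs.getD (b + n * k) d) := by
      intro k hk
      rw [List.mem_range] at hk
      have h1 : ((b : Int) + (n : Int) * (k : Int)).toNat = b + n * k := by
        rw [show (b : Int) + (n : Int) * (k : Int) = ((b + n * k : Nat) : Int) by push_cast; ring]
        exact Int.toNat_natCast _
      rw [h1, List.getElem?_eq_getElem (hlt k hk)]
      rw [List.getD_eq_getElem cs d (hlt k hk)]
    rw [List.filterMap_congr hfm]
    rw [filter_mod_range n b hn hb cs.length, List.map_map]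
    congr 1
    exact congrFun List.filterMap_eq_map _
  · have hmin : min (b : Int) (cs.length : Int) = (cs.length : Int) := by omega
    rw [hmin, if_neg (by omega)]
    simp only [List.range_zero, List.filterMap_nil]
    have hfe : (List.range cs.length).filter (fun i => decide (i % n = b)) = [] := by
      rw [List.filter_eq_nil_iff]
      intro i hi
      rw [List.mem_range] at hi
      have : i % n = i := Nat.mod_eq_of_lt (by omega)
      simp [this]; omega
    rw [hfe]; simp

theorem pySetD_natCast {α : Type} (xs : List α) (k : Nat) (v : α) (h : k < xs.length) :
    PySem.List.pySetD xs (k : Int) v = xs.set k v := by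
  have hk : ((k : Int) < (xs.length : Int)) := by exact_mod_cast h
  simp [PySem.List.pySetD, PySem.List.pySet?, PySem.List.pyIdx?, hk]

theorem distA {α : Type} (n : Nat) (hn : 0 < n) (cs : List α) (d : α) (init : List (List α))
    (hlen : init.length = n) :
    (PySem.List.pyRange 0 (cs.length : Int) 1).foldl (fun cm c =>
        PySem.List.pySetD cm (PySem.Int.mod c (n : Int))
          (PySem.List.pyGetD cm (PySem.Int.mod c (n : Int)) [] ++ [PySem.List.pyGetD cs c d])) init
    = (List.range n).map (fun b =>
        init.getD b [] ++ ((List.range cs.length).filter (fun i => decide (i % n = b))).map (fun i => cs.getD i d)) := by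
  induction cs using List.reverseRecOn with
  | nil =>
    rw [PySem.List.pyRange_one_eq_nil (by simp)]
    simp only [List.foldl_nil, List.length_nil, List.range_zero, List.filter_nil, List.map_nil,
      List.append_nil]
    apply List.ext_getElem (by simp [hlen])
    intro i h1 h2
    simp only [List.getElem_map, List.getElem_range]
    rw [List.getD_eq_getElem init [] (by omega)]
  | append_singleton xs x ih =>
    have hL : ((xs ++ [x]).length : Int) = (xs.length : Int) + 1 := by simp
    rw [hL, PySem.List.pyRange_one_succ_right (by positivity), List.foldl_append, List.foldl_cons,
      List.foldl_nil]
    have hcongr : (PySem.List.pyRange 0 (xs.length : Int) 1).foldl (fun cm c =>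
        PySem.List.pySetD cm (PySem.Int.mod c (n : Int))
          (PySem.List.pyGetD cm (PySem.Int.mod c (n : Int)) [] ++ [PySem.List.pyGetD (xs ++ [x]) c d])) init
        = (PySem.List.pyRange 0 (xs.length : Int) 1).foldl (fun cm c =>
        PySem.List.pySetD cm (PySem.Int.mod c (n : Int))
          (PySem.List.pyGetD cm (PySem.Int.mod c (n : Int)) [] ++ [PySem.List.pyGetD xs c d])) init := by
      apply PySem.List.foldl_congr_mem
      intro acc c hc
      rw [PySem.List.mem_pyRange_one] at hc
      have h1 : PySem.List.pyGetD (xs ++ [x]) c d = PySem.List.pyGetD xs c d := by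
        rw [PySem.List.pyGetD_eq_getElem _ d hc.1 (by simp; omega),
          PySem.List.pyGetD_eq_getElem _ d hc.1 (by omega)]
        exact List.getElem_append_left (by omega)
      rw [h1]
    rw [hcongr, ih]
    set L := xs.length with hLdef
    have hmod : PySem.Int.mod (L : Int) (n : Int) = ((L % n : Nat) : Int) := PySem.Int.mod_natCast L n
    have hmlt : L % n < n := Nat.mod_lt _ hn
    have hx : PySem.List.pyGetD (xs ++ [x]) (L : Int) d = x := by
      rw [PySem.List.pyGetD_natCast, List.getD_eq_getElem _ d (by simp [hLdef])]
      exact List.getElem_concat_length hLdef.symm _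
    rw [hmod, hx]
    set g := fun b => init.getD b [] ++ ((List.range L).filter (fun i => decide (i % n = b))).map (fun i => xs.getD i d) with hg
    have hglen : ((List.range n).map g).length = n := by simp
    rw [PySem.List.pyGetD_natCast]
    have hgetd : ((List.range n).map g).getD (L % n) [] = g (L % n) := by
      rw [List.getD_eq_getElem _ _ (by simp [hmlt]), List.getElem_map, List.getElem_range]
    rw [hgetd, pySetD_natCast _ _ _ (by simp [hmlt])]
    apply List.ext_getElem (by simp)
    intro i h1 h2
    rw [List.getElem_set (by simpa using h2), List.getElem_map, List.getElem_range]
    have hi : i < n := by simpa using h2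
    have hgxx : ∀ b, b < n → init.getD b [] ++
        ((List.range (xs ++ [x]).length).filter (fun i => decide (i % n = b))).map (fun i => (xs ++ [x]).getD i d)
        = g b ++ (if L % n = b then [x] else []) := by
      intro b hbn
      simp only [List.length_append, List.length_singleton, ← hLdef]
      rw [List.range_succ, List.filter_append, List.map_append]
      have hmap1 : ((List.range L).filter (fun i => decide (i % n = b))).map (fun i => (xs ++ [x]).getD i d)
          = ((List.range L).filter (fun i => decide (i % n = b))).map (fun i => xs.getD i d) := by
        apply List.map_congr_left
        intro i hi2
        have : i < L := by
          have := List.mem_range.mp (List.mem_of_mem_filter hi2)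
          omega
        rw [List.getD_eq_getElem _ d (by simp; omega), List.getD_eq_getElem _ d (by omega)]
        exact List.getElem_append_left (by omega)
      rw [hmap1]
      by_cases hLb : L % n = b
      · simp only [List.filter_singleton, hLb, decide_true, if_true, cond_true]
        have hxg : ([L].map (fun i => (xs ++ [x]).getD i d)) = [x] := by
          simp only [List.map_cons, List.map_nil]
          rw [List.getD_eq_getElem _ d (by simp [hLdef])]
          rw [List.getElem_concat_length hLdef.symm]
        rw [hxg, hg, List.append_assoc]
      · simp [hLb, hg]
    rw [show (List.map
        (fun b =>
          init.getD b [] ++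
            List.map (fun i => (xs ++ [x]).getD i d)
              (List.filter (fun i => decide (i % n = b)) (List.range (xs ++ [x]).length)))
        (List.range n))[i] = init.getD i [] ++
            List.map (fun j => (xs ++ [x]).getD j d)
              (List.filter (fun j => decide (j % n = i)) (List.range (xs ++ [x]).length)) by
      rw [List.getElem_map, List.getElem_range]]
    rw [hgxx i hi]
    by_cases hij : L % n = i
    · rw [if_pos hij, hij]; simp
    · rw [if_neg hij, if_neg hij, List.append_nil]

theorem map_chunks_eq_alt_of_pos (no_array : Int) (ics wcs : List (Int × Int × Int))
    (h : 0 < no_array) : map_chunks no_array ics wcs = map_chunks_alt no_array ics wcs := by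
  simp only [map_chunks, map_chunks_alt]
  rw [chunks_eq ics wcs]
  set cs := (chunksToDict wcs).items.flatMap (fun p =>
        (((chunksToDict ics).items.foldl (fun d q => d.modify q.1.2 [] (· ++ [q.2])) PySem.Dict.empty).getD p.1.1 []).map
          (fun iv => [iv, p.2])) with hcs
  set n := no_array.toNat with hn
  have hno : ((n : Nat) : Int) = no_array := Int.toNat_of_nonneg h.le
  have hnpos : 0 < n := by omega
  rw [← hno]
  have hinit : (PySem.List.pyRange 0 (n : Int) 1).foldl
      (fun cm _ => cm ++ [([] : List (List Int))]) [] = List.replicate n [] := by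
    rw [PySem.List.foldl_append_singleton_eq_map (fun _ => ([] : List (List Int)))]
    rw [List.map_const', PySem.List.length_pyRange_one]
    simp
  rw [hinit, distA n hnpos cs [] _ (by simp)]
  rw [PySem.List.pyRange_one]
  rw [List.map_map]
  apply List.map_congr_left
  intro b hb
  rw [List.mem_range] at hb
  have h0 : ((0 : Int) + (b : Int)) = (b : Int) := by omega
  simp only [Function.comp_def, h0]
  rw [slice?_stride cs n b [] hnpos hb, Option.getD_some]
  have hrep : (List.replicate n ([] : List (List Int))).getD b [] = [] := by
    rw [List.getD_eq_getElem _ _ (by simpa using hb), List.getElem_replicate]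
  rw [hrep, List.nil_append]

theorem map_chunks_eq_alt_of_nomatch (no_array : Int) (ics wcs : List (Int × Int × Int))
    (hno : ¬ 0 < no_array) (h : ∀ t ∈ wcs, ∀ s ∈ ics, t.1 ≠ s.2.1) :
    map_chunks no_array ics wcs = map_chunks_alt no_array ics wcs := by
  simp only [map_chunks, map_chunks_alt]
  have hnil : PySem.List.pyRange 0 no_array 1 = [] := PySem.List.pyRange_one_eq_nil (by omega)
  rw [hnil]
  have hkey : ∀ ij ∈ (chunksToDict wcs).keys, ∀ kl ∈ (chunksToDict ics).keys,
      (ij.1 == kl.2) = false := by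
    intro ij hij kl hkl
    obtain ⟨t, ht, rfl⟩ := mem_keys_chunksToDict hij
    obtain ⟨s, hs, rfl⟩ := mem_keys_chunksToDict hkl
    simpa using h t ht s hs
  have hA0 : (chunksToDict wcs).keys.foldl (fun acc ij =>
      (chunksToDict ics).keys.foldl (fun acc2 kl =>
        if ij.1 == kl.2 then acc2 ++ [[(chunksToDict ics).getD kl 0, (chunksToDict wcs).getD ij 0]] else acc2) acc) []
      = ([] : List (List Int)) := by
    rw [PySem.List.foldl_congr_mem _ _ (fun acc _ => acc)]
    · exact PySem.List.foldl_ignore _ _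
    · intro acc ij hij
      rw [PySem.List.foldl_congr_mem _ _ (fun acc2 _ => acc2)]
      · exact PySem.List.foldl_ignore _ _
      · intro acc2 kl hkl
        rw [hkey ij hij kl hkl]
        simp
  rw [hA0]
  simp

-- ===== VERDICT =====
theorem map_chunks_spec : Claim_equal_map_chunks := by
  intro no_array ics wcs _ hpre
  unfold Spec_map_chunks
  by_cases h : 0 < no_array
  · exact map_chunks_eq_alt_of_pos no_array ics wcs h
  · exact map_chunks_eq_alt_of_nomatch no_array ics wcs h (hpre.resolve_left h)
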